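-- pv_equiv track=rewrite | github.com/CAMeL-Lab/arabic-gec | areta/scripts/alignment/al_prepare_input.py | _generate_align_pairs
-- ===== SOURCE A (Python) =====
-- def _generate_align_pairs(list_indices_input_correct, current_line):
--     i = 0
--     exp_indices = _expand_list_indices(list_indices_input_correct)
--     align_pairs_list = []
--     for w in current_line.split():
--         if (i, i + 1) not in exp_indices:
--             align_pairs_list.append((i, i + 1, w, w))
--         i += 1
--
--     align_pairs_list.extend(list_indices_input_correct)
--     return sorted(align_pairs_list, key=lambda x: (x[0], x[1]))
--
-- def _expand_list_indices(list_indices_input_correct):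
--     expanded_list = []
--     for e in list_indices_input_correct:
--         if e[1] - e[0] > 1:
--             intermediate_list = _gen_intermediate(e[0], e[1])
--             expanded_list.extend(intermediate_list)
--         else:
--             expanded_list.append((e[0], e[1]))
--     return expanded_list
--
-- def _gen_intermediate(first, last):
--     new_l = []
--     i = first
--     while i < last:
--         new_l.append((i, i + 1))
--         i += 1
--     return new_l
-- ===== SOURCE B (Python) =====
-- def _generate_align_pairs(list_indices_input_correct, current_line):
--     word_pairs = [(i, i + 1, w, w)
--                   for i, w in enumerate(current_line.split())
--                   if not any(e[0] <= i < e[1] for e in list_indices_input_correct)]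
--     spans = sorted(list_indices_input_correct, key=lambda x: (x[0], x[1]))
--     out = []
--     j = 0
--     for wp in word_pairs:
--         while j < len(spans) and (spans[j][0], spans[j][1]) < (wp[0], wp[1]):
--             out.append(spans[j])
--             j += 1
--         out.append(wp)
--     out.extend(spans[j:])
--     return out
-- ===== Notes on version B (the rewrite author's own statement) =====
-- stated objective: alternative
-- what changed: Instead of materialising every span as an expanded (i,i+1) pair list, scanning that list per word, and sorting the full concatenated result, B tests each word position directly against the span bounds (no expansion), emits the word pairs already in key order via a filtered enumerate, sorts only the original spans, and merges the two ordered streams with a pointer walk.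
import Mathlib
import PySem

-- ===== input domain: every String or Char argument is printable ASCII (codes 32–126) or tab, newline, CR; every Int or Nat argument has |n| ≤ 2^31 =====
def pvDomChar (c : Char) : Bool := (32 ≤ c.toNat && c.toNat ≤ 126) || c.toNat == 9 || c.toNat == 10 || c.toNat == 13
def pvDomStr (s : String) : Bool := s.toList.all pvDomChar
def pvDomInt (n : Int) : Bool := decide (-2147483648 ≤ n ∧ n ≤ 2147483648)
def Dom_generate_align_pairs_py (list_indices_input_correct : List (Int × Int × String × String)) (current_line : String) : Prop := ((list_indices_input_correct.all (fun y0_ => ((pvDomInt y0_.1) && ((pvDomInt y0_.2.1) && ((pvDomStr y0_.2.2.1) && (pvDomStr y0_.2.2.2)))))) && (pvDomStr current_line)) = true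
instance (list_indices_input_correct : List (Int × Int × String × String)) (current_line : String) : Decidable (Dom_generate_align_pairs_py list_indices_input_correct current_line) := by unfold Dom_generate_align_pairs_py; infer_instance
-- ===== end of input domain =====

-- B replaces A's expanded-pair list + full sort of everything by a coverage set, a
-- comprehension for the (already ordered) word pairs, a sort of the spans only, and a
-- two-pointer merge of the two ordered streams (objective: alternative decomposition).

-- ===== PORT A =====
-- the counting while loop of _gen_intermediate ('i = first; while i < last: append((i, i+1)); i += 1'
-- is the loop 'for i in range(first, last)': ported with the PySem range primitive)
def genIntermediateA (first last : Int) : List (Int × Int) :=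
  (PySem.List.pyRange first last).map (fun i => (i, i + 1))

-- _expand_list_indices
def expandListIndicesA (list_indices_input_correct : List (Int × Int × String × String)) : List (Int × Int) :=
  list_indices_input_correct.foldl
    (fun acc e =>
      if e.2.1 - e.1 > 1 then acc ++ genIntermediateA e.1 e.2.1
      else acc ++ [(e.1, e.2.1)])
    []

def generate_align_pairs_py (list_indices_input_correct : List (Int × Int × String × String)) (current_line : String) : List (Int × Int × String × String) :=
  let exp_indices := expandListIndicesA list_indices_input_correct
  let loop := (PySem.Str.split₀ current_line).foldl
    (fun (st : Int × List (Int × Int × String × String)) w =>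
      (st.1 + 1,
       if (st.1, st.1 + 1) ∈ exp_indices then st.2
       else st.2 ++ [(st.1, st.1 + 1, w, w)]))
    (0, [])
  PySem.List.sorted2 (loop.2 ++ list_indices_input_correct) (fun x => x.1) (fun x => x.2.1)

-- ===== PORT B =====
-- 'not any(e[0] <= i < e[1] for e in ...)' — is word position i covered by some span?
def coveredQ (list_indices_input_correct : List (Int × Int × String × String)) (i : Int) : Bool :=
  list_indices_input_correct.any (fun e => decide (e.1 ≤ i) && decide (i < e.2.1))

-- the inner while loop: pop the leading remaining spans whose key (x[0], x[1])
-- precedes the word pair's key (Python tuple '<' written out component-wise)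
def emitLtB (wp : Int × Int × String × String) :
    List (Int × Int × String × String) →
      List (Int × Int × String × String) × List (Int × Int × String × String)
  | [] => ([], [])
  | s :: ss =>
    if s.1 < wp.1 ∨ (s.1 = wp.1 ∧ s.2.1 < wp.2.1) then
      let pr := emitLtB wp ss
      (s :: pr.1, pr.2)
    else ([], s :: ss)

def generate_align_pairs_py_alt (list_indices_input_correct : List (Int × Int × String × String)) (current_line : String) : List (Int × Int × String × String) :=
  let word_pairs := ((PySem.List.enumerate (PySem.Str.split₀ current_line)).filter
      (fun p => !(coveredQ list_indices_input_correct p.1))).map (fun p => (p.1, p.1 + 1, p.2, p.2))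
  let spans := PySem.List.sorted2 list_indices_input_correct (fun x => x.1) (fun x => x.2.1)
  let st := word_pairs.foldl
    (fun (st : List (Int × Int × String × String) × List (Int × Int × String × String)) wp =>
      let pr := emitLtB wp st.1
      (pr.2, st.2 ++ pr.1 ++ [wp]))
    (spans, [])
  st.2 ++ st.1

-- ===== PRECONDITION & SPEC =====
def Spec_generate_align_pairs_py (list_indices_input_correct : List (Int × Int × String × String)) (current_line : String) (out : List (Int × Int × String × String)) : Prop := out = generate_align_pairs_py_alt list_indices_input_correct current_line
instance (list_indices_input_correct : List (Int × Int × String × String)) (current_line : String) (out : List (Int × Int × String × String)) : Decidable (Spec_generate_align_pairs_py list_indices_input_correct current_line out) := by unfold Spec_generate_align_pairs_py; infer_instance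

-- ===== CLAIM (what is proved, stated in full; the proofs are below) =====
def Claim_equal_generate_align_pairs_py : Prop := ∀ (list_indices_input_correct : List (Int × Int × String × String)) (current_line : String), Dom_generate_align_pairs_py list_indices_input_correct current_line → Spec_generate_align_pairs_py list_indices_input_correct current_line (generate_align_pairs_py list_indices_input_correct current_line)

-- ===== LEMMAS AND PROOFS =====

-- the strict lexicographic key order '(y[0], y[1]) < (x[0], x[1])', as a Prop
abbrev pvR (a b : Int × Int × String × String) : Prop :=
  a.1 < b.1 ∨ (a.1 = b.1 ∧ a.2.1 < b.2.1)

-- sorted2's internal 'before' test for the key pair (x[0], x[1])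
def pvB (a b : Int × Int × String × String) : Bool :=
  decide (a.1 < b.1) || (!decide (b.1 < a.1) && decide (a.2.1 < b.2.1))

theorem pvB_eq_decide_pvR (a b : Int × Int × String × String) :
    pvB a b = decide (pvR a b) := by
  simp only [pvB, pvR]
  by_cases h1 : a.1 < b.1 <;> by_cases h2 : b.1 < a.1 <;>
    by_cases h3 : a.2.1 < b.2.1 <;> simp [h1, h2, h3] <;> omega

theorem pvR_trans {a b c : Int × Int × String × String} :
    pvR a b → pvR b c → pvR a c := by unfold pvR; omega

theorem pvR_not_trans {a b c : Int × Int × String × String} :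
    ¬ pvR a b → ¬ pvR b c → ¬ pvR a c := by unfold pvR; omega

-- the clean structural merge that mergeLoopB computes
def pvMerge : List (Int × Int × String × String) → List (Int × Int × String × String) →
    List (Int × Int × String × String)
  | [], ys => ys
  | x :: xs, [] => x :: xs
  | x :: xs, y :: ys =>
    if pvR y x then y :: pvMerge (x :: xs) ys else x :: pvMerge xs (y :: ys)

theorem pvMerge_nil_right (xs : List (Int × Int × String × String)) :
    pvMerge xs [] = xs := by cases xs <;> simp [pvMerge]

theorem pvMerge_cons_cons (x y : Int × Int × String × String) (xs ys : List (Int × Int × String × String)) :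
    pvMerge (x :: xs) (y :: ys) =
      if pvR y x then y :: pvMerge (x :: xs) ys else x :: pvMerge xs (y :: ys) := by
  simp [pvMerge]

theorem pvIns_nil (x : Int × Int × String × String) :
    PySem.List.insertBy pvB x [] = [x] := rfl

theorem pvIns_cons (x y : Int × Int × String × String) (ys : List (Int × Int × String × String)) :
    PySem.List.insertBy pvB x (y :: ys) =
      if pvR x y then x :: y :: ys else y :: PySem.List.insertBy pvB x ys := by
  show (if pvB x y = true then x :: y :: ys else y :: PySem.List.insertBy pvB x ys) = _
  rw [pvB_eq_decide_pvR]
  simp only [decide_eq_true_eq]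

theorem sorted2_eq_foldl (xs : List (Int × Int × String × String)) :
    PySem.List.sorted2 xs (fun x => x.1) (fun x => x.2.1) =
      xs.foldl (fun acc x => PySem.List.insertBy pvB x acc) [] := by
  rfl

theorem pvMerge_cons_split (w : Int × Int × String × String)
    (wp spans : List (Int × Int × String × String)) :
    pvMerge (w :: wp) spans =
      (emitLtB w spans).1 ++ w :: pvMerge wp (emitLtB w spans).2 := by
  induction spans with
  | nil => simp [emitLtB, pvMerge_nil_right]
  | cons s ss ih =>
    rw [pvMerge_cons_cons]
    by_cases h : pvR s w
    · rw [if_pos h]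
      simp only [emitLtB]
      rw [if_pos (show s.1 < w.1 ∨ (s.1 = w.1 ∧ s.2.1 < w.2.1) from h)]
      simp [ih]
    · rw [if_neg h]
      simp only [emitLtB]
      rw [if_neg (show ¬ (s.1 < w.1 ∨ (s.1 = w.1 ∧ s.2.1 < w.2.1)) from h)]
      simp

theorem foldl_emit_eq_pvMerge (wp spans out : List (Int × Int × String × String)) :
    ((wp.foldl
        (fun (st : List (Int × Int × String × String) × List (Int × Int × String × String)) x =>
          let pr := emitLtB x st.1
          (pr.2, st.2 ++ pr.1 ++ [x]))
        (spans, out)).2 ++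
      (wp.foldl
        (fun (st : List (Int × Int × String × String) × List (Int × Int × String × String)) x =>
          let pr := emitLtB x st.1
          (pr.2, st.2 ++ pr.1 ++ [x]))
        (spans, out)).1) = out ++ pvMerge wp spans := by
  induction wp generalizing spans out with
  | nil => simp [pvMerge]
  | cons w wp ih =>
    rw [List.foldl_cons]
    simp only []
    rw [ih, pvMerge_cons_split]
    simp

theorem pvMerge_singleton (ws : List (Int × Int × String × String))
    (x : Int × Int × String × String) :
    pvMerge ws [x] = PySem.List.insertBy pvB x ws := by
  induction ws with
  | nil => simp [pvMerge, pvIns_nil]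
  | cons w ws ih =>
    rw [pvMerge_cons_cons, pvIns_cons, pvMerge_nil_right, ih]

theorem insert_pvMerge (ws t : List (Int × Int × String × String))
    (x : Int × Int × String × String) :
    PySem.List.insertBy pvB x (pvMerge ws t) = pvMerge ws (PySem.List.insertBy pvB x t) := by
  induction ws generalizing t with
  | nil => simp [pvMerge]
  | cons w ws ihw =>
    induction t with
    | nil =>
      rw [pvMerge_nil_right, pvIns_nil, pvMerge_singleton]
    | cons u us iht =>
      by_cases huw : pvR u w
      · by_cases hxu : pvR x u
        · have hxw : pvR x w := pvR_trans hxu huw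
          simp [pvMerge_cons_cons, pvIns_cons, huw, hxu, hxw]
        · simp [pvMerge_cons_cons, pvIns_cons, huw, hxu, iht]
      · by_cases hxu : pvR x u
        · by_cases hxw : pvR x w
          · simp [pvMerge_cons_cons, pvIns_cons, huw, hxu, hxw]
          · simp [pvMerge_cons_cons, pvIns_cons, huw, hxu, hxw, ihw]
        · have hxw : ¬ pvR x w := pvR_not_trans hxu huw
          simp [pvMerge_cons_cons, pvIns_cons, huw, hxu, hxw, ihw]

theorem foldl_insert_pvMerge (sp ws t : List (Int × Int × String × String)) :
    sp.foldl (fun acc x => PySem.List.insertBy pvB x acc) (pvMerge ws t) =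
      pvMerge ws (sp.foldl (fun acc x => PySem.List.insertBy pvB x acc) t) := by
  induction sp generalizing t with
  | nil => rfl
  | cons s sp ih => simp only [List.foldl_cons, insert_pvMerge, ih]

theorem foldl_insert_of_sorted (l pref : List (Int × Int × String × String))
    (hp : ∀ x ∈ l, ∀ y ∈ pref, pvB x y = false)
    (hl : l.Pairwise (fun a b => pvB b a = false)) :
    l.foldl (fun acc x => PySem.List.insertBy pvB x acc) pref = pref ++ l := by
  induction l generalizing pref with
  | nil => simp
  | cons a l ih =>
    rw [List.foldl_cons,
        PySem.List.insertBy_of_forall_not_before pvB a pref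
          (fun y hy => hp a (List.mem_cons_self) y hy),
        ih]
    · simp
    · intro x hx y hy
      rcases List.mem_append.1 hy with hy | hy
      · exact hp x (List.mem_cons_of_mem _ hx) y hy
      · rw [List.mem_singleton] at hy; subst hy
        exact (List.pairwise_cons.1 hl).1 x hx
    · exact (List.pairwise_cons.1 hl).2

-- membership in A's expanded index list ↔ membership in B's coverage set
theorem mem_genIntermediateA (a b p q : Int) :
    (p, q) ∈ genIntermediateA a b ↔ a ≤ p ∧ p < b ∧ q = p + 1 := by
  unfold genIntermediateA
  rw [List.mem_map]
  constructor
  · rintro ⟨x, hx, heq⟩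
    cases heq
    rw [PySem.List.mem_pyRange_one] at hx
    omega
  · rintro ⟨h1, h2, rfl⟩
    exact ⟨p, PySem.List.mem_pyRange_one.2 ⟨h1, h2⟩, rfl⟩

theorem mem_expand_iff (l : List (Int × Int × String × String)) (i : Int) :
    (i, i + 1) ∈ expandListIndicesA l ↔ ∃ e ∈ l, e.1 ≤ i ∧ i < e.2.1 := by
  have h : expandListIndicesA l = [] ++ l.flatMap
      (fun e => if e.2.1 - e.1 > 1 then genIntermediateA e.1 e.2.1 else [(e.1, e.2.1)]) := by
    rw [← PySem.List.foldl_append_eq_flatMap]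
    unfold expandListIndicesA
    apply PySem.List.foldl_congr_mem
    intro acc x hx
    split <;> rfl
  rw [h, List.nil_append, List.mem_flatMap]
  constructor
  · rintro ⟨e, he, hm⟩
    refine ⟨e, he, ?_⟩
    by_cases hw : e.2.1 - e.1 > 1 <;> simp [hw] at hm
    · rw [mem_genIntermediateA] at hm; omega
    · omega
  · rintro ⟨e, he, h1, h2⟩
    refine ⟨e, he, ?_⟩
    by_cases hw : e.2.1 - e.1 > 1 <;> simp [hw]
    · rw [mem_genIntermediateA]; omega
    · omega

theorem coveredQ_iff (l : List (Int × Int × String × String)) (i : Int) :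
    coveredQ l i = true ↔ ∃ e ∈ l, e.1 ≤ i ∧ i < e.2.1 := by
  unfold coveredQ
  rw [List.any_eq_true]
  simp

-- A's counting loop produces exactly B's filtered-enumerate comprehension
theorem loopA_eq_wordPairs (exp : List (Int × Int)) (q : Int → Bool)
    (hiff : ∀ i : Int, ((i, i + 1) ∈ exp ↔ q i = true))
    (ws : List String) (k : Int) (acc : List (Int × Int × String × String)) :
    (ws.foldl
      (fun (st : Int × List (Int × Int × String × String)) w =>
        (st.1 + 1,
         if (st.1, st.1 + 1) ∈ exp then st.2
         else st.2 ++ [(st.1, st.1 + 1, w, w)]))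
      (k, acc)).2 =
      acc ++ ((PySem.List.enumerate ws k).filter
        (fun p => !(q p.1))).map (fun p => (p.1, p.1 + 1, p.2, p.2)) := by
  induction ws generalizing k acc with
  | nil => simp [PySem.List.enumerate]
  | cons w ws ih =>
    rw [List.foldl_cons, PySem.List.enumerate]
    by_cases hm : (k, k + 1) ∈ exp
    · have hc : q k = true := (hiff k).1 hm
      simp only [hm, if_true, List.filter_cons, hc, Bool.not_true]
      exact ih (k + 1) acc
    · have hc : q k = false := by
        rw [← Bool.not_eq_true]
        intro h; exact hm ((hiff k).2 h)
      simp only [hm, if_false, List.filter_cons, hc, Bool.not_false]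
      rw [ih (k + 1)]
      simp

-- the word-pair stream is strictly increasing in the key, so it is 'already sorted'
theorem wordPairs_increasing (q : Int → Bool) (ws : List String) (k : Int) :
    (((PySem.List.enumerate ws k).filter
        (fun p => !(q p.1))).map
          (fun p => (p.1, p.1 + 1, p.2, p.2))).Pairwise
      (fun a b => pvB b a = false) := by
  have henum : (PySem.List.enumerate ws k).Pairwise (fun p q => p.1 < q.1) := by
    induction ws generalizing k with
    | nil => simp [PySem.List.enumerate]
    | cons w ws ih =>
      rw [PySem.List.enumerate]
      refine List.pairwise_cons.2 ⟨?_, ih (k + 1)⟩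
      intro q hq
      have : k + 1 ≤ q.1 := by
        clear ih
        induction ws generalizing k with
        | nil => simp [PySem.List.enumerate] at hq
        | cons v vs ih2 =>
          rw [PySem.List.enumerate, List.mem_cons] at hq
          rcases hq with rfl | hq
          · omega
          · have := ih2 (k := k + 1) hq
            omega
      omega
  have hf := List.Pairwise.filter (fun p => !(q p.1)) henum
  have hm := List.Pairwise.map (f := fun p : Int × String => (p.1, p.1 + 1, p.2, p.2))
      (R := fun p q : Int × String => p.1 < q.1)
      (S := fun a b : Int × Int × String × String => pvB b a = false) ?_ hf
  · exact hm
  · intro a b hab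
    simp only [pvB]
    simp only [Bool.or_eq_false_iff, Bool.and_eq_false_iff]
    constructor
    · simpa using by omega
    · left; simpa using by omega

-- ===== VERDICT (by name: the statement is the Claim_ definition above) =====
theorem generate_align_pairs_py_spec : Claim_equal_generate_align_pairs_py := by
  intro l cl _
  unfold Spec_generate_align_pairs_py generate_align_pairs_py generate_align_pairs_py_alt
  simp only []
  have hiff : ∀ i : Int, ((i, i + 1) ∈ expandListIndicesA l ↔ coveredQ l i = true) := by
    intro i; rw [mem_expand_iff, coveredQ_iff]
  set ws := PySem.Str.split₀ cl with hws
  set wp := ((PySem.List.enumerate ws).filter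
      (fun p => !(coveredQ l p.1))).map
        (fun p => (p.1, p.1 + 1, p.2, p.2)) with hwp
  rw [loopA_eq_wordPairs (expandListIndicesA l) (coveredQ l) hiff ws 0 []]
  rw [List.nil_append, sorted2_eq_foldl, List.foldl_append]
  rw [foldl_insert_of_sorted _ [] (by simp) (wordPairs_increasing (coveredQ l) ws 0)]
  rw [List.nil_append]
  rw [foldl_emit_eq_pvMerge, List.nil_append]
  rw [sorted2_eq_foldl]
  calc List.foldl (fun acc x => PySem.List.insertBy pvB x acc) wp l
      = List.foldl (fun acc x => PySem.List.insertBy pvB x acc) (pvMerge wp []) l := by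
        rw [pvMerge_nil_right]
    _ = pvMerge wp (List.foldl (fun acc x => PySem.List.insertBy pvB x acc) [] l) :=
        foldl_insert_pvMerge l wp []
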